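-- pv_equiv track=rewrite | github.com/docmarionum1/adventofcode | aoc/graveyard.py | consumes_all
-- ===== SOURCE A (Python) =====
-- def consumes_all(numbers, pattern):
--   i = 0
--   j = 0
--   while j < len(numbers):
--     if pattern[i % len(pattern)] != numbers[j]:
--       return False
--
--     i += 1
--     j += 1
--
--   return True
-- ===== SOURCE B (Python) =====
-- def consumes_all(numbers, pattern):
--   if not numbers:
--     return True
--   reps = -(-len(numbers) // len(pattern))
--   expanded = (list(pattern) * reps)[:len(numbers)]
--   return expanded == list(numbers)
-- ===== Notes on version B (the rewrite author's own statement) =====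
-- stated objective: simpler
-- what changed: Instead of an indexed while loop comparing element by element with early return, B tiles the pattern with list multiplication (ceil-division repetitions), truncates it to len(numbers), and does one whole-list equality comparison.
import Mathlib
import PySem

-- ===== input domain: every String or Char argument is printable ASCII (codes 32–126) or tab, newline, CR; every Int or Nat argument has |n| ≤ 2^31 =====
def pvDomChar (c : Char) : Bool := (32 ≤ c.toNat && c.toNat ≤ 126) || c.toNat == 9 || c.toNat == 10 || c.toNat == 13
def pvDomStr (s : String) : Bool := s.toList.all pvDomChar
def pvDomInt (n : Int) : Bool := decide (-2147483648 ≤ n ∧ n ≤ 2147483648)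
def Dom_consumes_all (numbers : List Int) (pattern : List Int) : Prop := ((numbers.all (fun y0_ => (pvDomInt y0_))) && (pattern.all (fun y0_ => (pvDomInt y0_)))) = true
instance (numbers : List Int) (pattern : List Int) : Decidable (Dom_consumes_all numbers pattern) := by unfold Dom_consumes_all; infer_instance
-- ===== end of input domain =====

-- B replaces A's indexed while loop (element-by-element compare with early return) by tiling the
-- pattern with list multiplication and doing one whole-list equality comparison (objective: simpler).

-- ===== PORT A =====
-- the while loop over j (i = j throughout): structural recursion over `numbers` carrying the counter i
def consumesAuxA (pattern : List Int) : List Int → Nat → Bool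
  | [], _ => true
  | n :: rest, i =>
    match PySem.List.pyGet? pattern (PySem.Int.mod (i : Int) (pattern.length : Int)) with
    | none => false   -- pattern = []: Python raises ZeroDivisionError here; excluded by Pre_
    | some v => if v ≠ n then false else consumesAuxA pattern rest (i + 1)

def consumes_all (numbers : List Int) (pattern : List Int) : Bool :=
  consumesAuxA pattern numbers 0

-- ===== PORT B =====
def consumes_all_alt (numbers : List Int) (pattern : List Int) : Bool :=
  if numbers = [] then true
  else
    let reps : Int := -(PySem.Int.floordiv (-(numbers.length : Int)) (pattern.length : Int))
    let expanded := PySem.List.slice (List.flatten (List.replicate reps.toNat pattern)) none (some (numbers.length : Int))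
    expanded == numbers

-- ===== PRECONDITION & SPEC =====
-- Pre_ excludes only non-empty numbers with an empty pattern, where the Python A raises ZeroDivisionError.
def Pre_consumes_all (numbers : List Int) (pattern : List Int) : Prop :=
  numbers = [] ∨ pattern ≠ []
instance (numbers : List Int) (pattern : List Int) : Decidable (Pre_consumes_all numbers pattern) := by unfold Pre_consumes_all; infer_instance

def pvWitness_consumes_all : List Int × List Int := ([1, 2, 1], [1, 2])

def Spec_consumes_all (numbers : List Int) (pattern : List Int) (out : Bool) : Prop := out = consumes_all_alt numbers pattern
instance (numbers : List Int) (pattern : List Int) (out : Bool) : Decidable (Spec_consumes_all numbers pattern out) := by unfold Spec_consumes_all; infer_instance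

-- ===== CLAIM (what is proved, stated in full; the proofs are below) =====
def Claim_equal_consumes_all : Prop := ∀ (numbers : List Int) (pattern : List Int), Dom_consumes_all numbers pattern → Pre_consumes_all numbers pattern → Spec_consumes_all numbers pattern (consumes_all numbers pattern)

-- ===== LEMMAS AND PROOFS =====

-- A's loop as a pointwise property (getD form, offset i)
theorem consumesAuxA_eq_true_iff (pattern : List Int) (hp : pattern ≠ []) :
    ∀ (numbers : List Int) (i : Nat),
      consumesAuxA pattern numbers i = true ↔
        ∀ k, k < numbers.length → numbers.getD k 0 = pattern.getD ((i + k) % pattern.length) 0 := by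
  intro numbers
  induction numbers with
  | nil => intro i; simp [consumesAuxA]
  | cons n rest ih =>
    intro i
    have hplen : 0 < pattern.length := List.length_pos_iff.mpr hp
    have hmod : PySem.Int.mod (i : Int) (pattern.length : Int) = ((i % pattern.length : Nat) : Int) :=
      PySem.Int.mod_natCast i pattern.length
    have hget : PySem.List.pyGet? pattern (PySem.Int.mod (i : Int) (pattern.length : Int))
        = some (pattern[i % pattern.length]'(Nat.mod_lt _ hplen)) := by
      rw [hmod, PySem.List.pyGet?_natCast]
      exact List.getElem?_eq_getElem (Nat.mod_lt _ hplen)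
    simp only [consumesAuxA, hget]
    by_cases hv : pattern[i % pattern.length]'(Nat.mod_lt _ hplen) = n
    · rw [if_neg (by simp [hv])]
      rw [ih (i + 1)]
      constructor
      · intro h k hk
        cases k with
        | zero =>
          simp only [List.getD_cons_zero, Nat.add_zero]
          rw [List.getD_eq_getElem _ _ (Nat.mod_lt _ hplen)]
          exact hv.symm
        | succ k' =>
          have hi : i + 1 + k' = i + (k' + 1) := by omega
          rw [List.getD_cons_succ, ← hi]
          exact h k' (by simpa using hk)
      · intro h k hk
        have hi : i + 1 + k = i + (k + 1) := by omega
        rw [hi]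
        have := h (k + 1) (by simpa using hk)
        rwa [List.getD_cons_succ] at this
    · rw [if_pos (by simpa using hv)]
      simp only [Bool.false_eq_true, false_iff]
      intro h
      have := h 0 (by simp)
      rw [List.getD_cons_zero, Nat.add_zero, List.getD_eq_getElem _ _ (Nat.mod_lt _ hplen)] at this
      exact hv this.symm

-- the tiled list, elementwise
theorem getD_flatten_replicate (l : List Int) :
    ∀ (r k : Nat), k < r * l.length →
      (List.flatten (List.replicate r l)).getD k 0 = l.getD (k % l.length) 0 := by
  intro r
  induction r with
  | zero => intro k hk; omega
  | succ r ih =>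
    intro k hk
    rw [Nat.succ_mul] at hk
    rw [List.replicate_succ, List.flatten_cons]
    by_cases h : k < l.length
    · rw [List.getD_append _ _ _ _ h, Nat.mod_eq_of_lt h]
    · rw [Nat.not_lt] at h
      rw [List.getD_append_right _ _ _ _ h, ih (k - l.length) (by omega)]
      rw [Nat.mod_eq_sub_mod h]

theorem length_flatten_replicate (l : List Int) (r : Nat) :
    (List.flatten (List.replicate r l)).length = r * l.length := by
  simp [List.length_flatten]

-- ceiling division: numbers fit inside reps copies of the pattern
theorem len_le_reps_mul (len p : Nat) (hp : 0 < p) :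
    (len : Int) ≤ -(PySem.Int.floordiv (-(len : Int)) (p : Int)) * (p : Int) := by
  have h := (PySem.Int.neg_floordiv_neg_eq_iff_of_pos (a := (len : Int)) (b := (p : Int))
    (q := -(PySem.Int.floordiv (-(len : Int)) (p : Int))) (by exact_mod_cast hp)).mp rfl
  exact h.2

theorem take_tiled_eq_iff (numbers pattern : List Int) (R : Nat)
    (hlen : numbers.length ≤ R * pattern.length) :
    (List.flatten (List.replicate R pattern)).take numbers.length = numbers ↔
      ∀ k, k < numbers.length → numbers.getD k 0 = pattern.getD (k % pattern.length) 0 := by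
  have hflatlen : (List.flatten (List.replicate R pattern)).length = R * pattern.length :=
    length_flatten_replicate _ _
  constructor
  · intro h k hk
    have hk' : k < (List.flatten (List.replicate R pattern)).length := by omega
    calc numbers.getD k 0
        = ((List.flatten (List.replicate R pattern)).take numbers.length).getD k 0 := by rw [h]
      _ = (List.flatten (List.replicate R pattern)).getD k 0 := by
          rw [List.getD_eq_getElem _ _ (by rw [List.length_take]; omega),
              List.getElem_take, List.getD_eq_getElem _ _ hk']
      _ = pattern.getD (k % pattern.length) 0 := getD_flatten_replicate pattern R k (by omega)
  · intro h
    apply List.ext_getElem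
    · rw [List.length_take]; omega
    · intro k hk1 hk2
      rw [List.getElem_take]
      have hk' : k < (List.flatten (List.replicate R pattern)).length := by omega
      have h1 := getD_flatten_replicate pattern R k (by omega)
      have h2 := h k hk2
      rw [List.getD_eq_getElem _ _ hk2] at h2
      rw [List.getD_eq_getElem _ _ hk'] at h1
      rw [h1]
      exact h2.symm

theorem consumes_all_alt_eq_true_iff (numbers pattern : List Int)
    (hn : numbers ≠ []) (hp : pattern ≠ []) :
    consumes_all_alt numbers pattern = true ↔
      ∀ k, k < numbers.length → numbers.getD k 0 = pattern.getD (k % pattern.length) 0 := by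
  have hplen : 0 < pattern.length := List.length_pos_iff.mpr hp
  have hle : (numbers.length : Int) ≤
      -(PySem.Int.floordiv (-(numbers.length : Int)) (pattern.length : Int)) * (pattern.length : Int) :=
    len_le_reps_mul numbers.length pattern.length hplen
  have h0 : 0 ≤ -(PySem.Int.floordiv (-(numbers.length : Int)) (pattern.length : Int)) := by
    have hn1 : (1 : Int) ≤ (numbers.length : Int) := by
      exact_mod_cast List.length_pos_iff.mpr hn
    nlinarith
  have hlen : numbers.length ≤
      (-(PySem.Int.floordiv (-(numbers.length : Int)) (pattern.length : Int))).toNat * pattern.length := by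
    have : (numbers.length : Int) ≤
        ((-(PySem.Int.floordiv (-(numbers.length : Int)) (pattern.length : Int))).toNat : Int)
          * (pattern.length : Int) := by
      rwa [Int.toNat_of_nonneg h0]
    exact_mod_cast this
  unfold consumes_all_alt
  rw [if_neg hn]
  simp only [PySem.List.slice_to_natCast, beq_iff_eq]
  exact take_tiled_eq_iff numbers pattern _ hlen

-- ===== VERDICT (by name: the statement is the Claim_ definition above) =====
theorem consumes_all_spec : Claim_equal_consumes_all := by
  intro numbers pattern _ hpre
  unfold Spec_consumes_all
  by_cases hn : numbers = []
  · subst hn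
    simp [consumes_all, consumesAuxA, consumes_all_alt]
  · have hp : pattern ≠ [] := by
      rcases hpre with h | h
      · exact absurd h hn
      · exact h
    have hA := consumesAuxA_eq_true_iff pattern hp numbers 0
    have hB := consumes_all_alt_eq_true_iff numbers pattern hn hp
    simp only [Nat.zero_add] at hA
    rw [Bool.eq_iff_iff]
    unfold consumes_all
    rw [hA, hB]
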